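-- pv_equiv track=rewrite | github.com/jandolezal/advent-of-code-2025 | 01/secret_entrance.py | part1
-- ===== SOURCE A (Python) =====
-- def part1(data):
--     current_step = 50
--     times_at_zero = 0
--
--     for direction, steps in data:
--         if direction == "R":
--             current_step = (current_step + steps) % 100
--         else:
--             current_step = (current_step - steps) % 100
--
--         if current_step == 0:
--             times_at_zero += 1
--
--     return times_at_zero
-- ===== SOURCE B (Python) =====
-- def part1(data):
--     # Divide and conquer: the position hits zero exactly when the signed sum of
--     # moves over a non-empty prefix is congruent to 50 mod 100. Count such
--     # prefixes recursively: split the range in half, count in the left half,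
--     # then count in the right half with the target shifted by the left sum.
--     def solve(lo, hi, target):
--         # returns (# non-empty prefixes of data[lo:hi] with signed sum ≡ target mod 100,
--         #          total signed sum of data[lo:hi])
--         if hi - lo == 0:
--             return (0, 0)
--         if hi - lo == 1:
--             direction, steps = data[lo]
--             d = steps if direction == "R" else -steps
--             return ((1 if (d - target) % 100 == 0 else 0), d)
--         mid = (lo + hi) // 2
--         c1, s1 = solve(lo, mid, target)
--         c2, s2 = solve(mid, hi, target - s1)
--         return (c1 + c2, s1 + s2)
--     return solve(0, len(data), 50)[0]
-- ===== Notes on version B (the rewrite author's own statement) =====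
-- stated objective: alternative
-- what changed: B replaces A's fused left-to-right stateful loop (mod-100 position plus inline counter) by a divide-and-conquer recursion: split the range in half, count prefixes whose signed sum hits the target mod 100 in each half, shifting the right half's target by the left half's total sum.
import Mathlib
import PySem

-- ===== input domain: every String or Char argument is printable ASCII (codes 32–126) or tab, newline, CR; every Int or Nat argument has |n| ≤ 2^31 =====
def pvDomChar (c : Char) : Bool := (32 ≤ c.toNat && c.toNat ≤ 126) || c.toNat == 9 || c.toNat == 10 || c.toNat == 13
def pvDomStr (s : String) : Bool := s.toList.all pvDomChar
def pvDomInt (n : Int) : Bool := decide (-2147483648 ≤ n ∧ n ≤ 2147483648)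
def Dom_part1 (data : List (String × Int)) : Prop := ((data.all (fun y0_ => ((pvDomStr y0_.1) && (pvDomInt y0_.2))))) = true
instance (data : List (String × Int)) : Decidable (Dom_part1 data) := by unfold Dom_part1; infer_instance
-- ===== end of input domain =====

-- B is an alternative algorithm (divide and conquer over the move list), same O(n) cost.
-- ===== PORT A =====
-- fused loop: bounded current position (mod 100 each step) and inline counter
def part1 (data : List (String × Int)) : Int :=
  (data.foldl (fun (st : Int × Int) dp =>
      let cur := if dp.1 == "R" then PySem.Int.mod (st.1 + dp.2) 100
                 else PySem.Int.mod (st.1 - dp.2) 100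
      (cur, if cur == 0 then st.2 + 1 else st.2)) (50, 0)).2

-- ===== PORT B =====
-- divide and conquer: (count of non-empty prefixes with signed sum ≡ target mod 100, total sum);
-- the right half is solved with the target shifted by the left half's total sum.
def part1_solve : List (String × Int) → Int → Int × Int
  | [], _ => (0, 0)
  | [dp], t =>
      let d := if dp.1 == "R" then dp.2 else -dp.2
      ((if PySem.Int.mod (d - t) 100 == 0 then (1 : Int) else 0), d)
  | a :: b :: rest, t =>
      let xs := a :: b :: rest
      let mid := xs.length / 2
      let r1 := part1_solve (xs.take mid) t
      let r2 := part1_solve (xs.drop mid) (t - r1.2)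
      (r1.1 + r2.1, r1.2 + r2.2)
termination_by xs _ => xs.length
decreasing_by
  · simp [List.length_take]; omega
  · simp [List.length_drop]; omega

def part1_alt (data : List (String × Int)) : Int :=
  (part1_solve data 50).1

-- ===== PRECONDITION & SPEC =====
def Spec_part1 (data : List (String × Int)) (out : Int) : Prop := out = part1_alt data
instance (data : List (String × Int)) (out : Int) : Decidable (Spec_part1 data out) := by unfold Spec_part1; infer_instance

-- ===== CLAIM (what is proved, stated in full; the proofs are below) =====
def Claim_equal_part1 : Prop := ∀ (data : List (String × Int)), Dom_part1 data → Spec_part1 data (part1 data)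

-- ===== LEMMAS AND PROOFS =====

-- linear reference function: count of non-empty prefixes with signed sum ≡ t (mod 100)
def cntP : List (String × Int) → Int → Int
  | [], _ => 0
  | dp :: rest, t =>
      let d := if dp.1 == "R" then dp.2 else -dp.2
      (if (d - t) % 100 = 0 then (1 : Int) else 0) + cntP rest (t - d)

-- total signed sum of the moves
def sumD (xs : List (String × Int)) : Int :=
  (xs.map (fun dp => if dp.1 == "R" then dp.2 else -dp.2)).sum

theorem cntP_append (l1 l2 : List (String × Int)) (t : Int) :
    cntP (l1 ++ l2) t = cntP l1 t + cntP l2 (t - sumD l1) := by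
  induction l1 generalizing t with
  | nil => simp [cntP, sumD]
  | cons dp rest ih =>
    simp only [List.cons_append, cntP, sumD, List.map_cons, List.sum_cons]
    rw [ih]
    simp [sumD]
    ring_nf

theorem cntP_congr (xs : List (String × Int)) (t1 t2 : Int) (h : t1 % 100 = t2 % 100) :
    cntP xs t1 = cntP xs t2 := by
  induction xs generalizing t1 t2 with
  | nil => rfl
  | cons dp rest ih =>
    simp only [cntP]
    set d := if (dp.1 == "R") = true then dp.2 else -dp.2 with hd
    rw [ih (t1 - d) (t2 - d) (by omega)]
    congr 1
    split_ifs with ha hb hb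
    · rfl
    · exact absurd (by omega) hb
    · exact absurd (by omega) ha
    · rfl

theorem solve_eq_aux (n : Nat) : ∀ (xs : List (String × Int)) (t : Int), xs.length ≤ n →
    part1_solve xs t = (cntP xs t, sumD xs) := by
  induction n with
  | zero =>
    intro xs t h
    have hx : xs = [] := List.eq_nil_of_length_eq_zero (Nat.le_zero.mp h)
    subst hx
    simp [part1_solve, cntP, sumD]
  | succ n ih =>
    intro xs t h
    match xs with
    | [] => simp [part1_solve, cntP, sumD]
    | [dp] => simp [part1_solve, cntP, sumD]
    | a :: b :: rest =>
      simp only [part1_solve]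
      rw [ih ((a :: b :: rest).take ((a :: b :: rest).length / 2)) t
            (by simp at h ⊢; omega),
          ih ((a :: b :: rest).drop ((a :: b :: rest).length / 2)) _
            (by simp at h ⊢; omega)]
      have hsplit : (a :: b :: rest).take ((a :: b :: rest).length / 2)
          ++ (a :: b :: rest).drop ((a :: b :: rest).length / 2) = a :: b :: rest :=
        List.take_append_drop _ _
      have hsum : sumD ((a :: b :: rest).take ((a :: b :: rest).length / 2))
          + sumD ((a :: b :: rest).drop ((a :: b :: rest).length / 2)) = sumD (a :: b :: rest) := by
        conv_rhs => rw [← hsplit]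
        simp [sumD]
      have hcnt : cntP ((a :: b :: rest).take ((a :: b :: rest).length / 2)) t
          + cntP ((a :: b :: rest).drop ((a :: b :: rest).length / 2))
              (t - sumD ((a :: b :: rest).take ((a :: b :: rest).length / 2)))
          = cntP (a :: b :: rest) t := by
        conv_rhs => rw [← hsplit]
        rw [cntP_append]
      rw [Prod.mk.injEq]
      exact ⟨hcnt, hsum⟩

theorem solve_eq (xs : List (String × Int)) (t : Int) :
    part1_solve xs t = (cntP xs t, sumD xs) :=
  solve_eq_aux xs.length xs t le_rfl

-- A's fold counter equals the starting counter plus the prefix count with target -c,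
-- for any representative c of the position mod 100
theorem A_inv (xs : List (String × Int)) (c t : Int) :
    (xs.foldl (fun (st : Int × Int) dp =>
      let cur := if dp.1 == "R" then PySem.Int.mod (st.1 + dp.2) 100
                 else PySem.Int.mod (st.1 - dp.2) 100
      (cur, if cur == 0 then st.2 + 1 else st.2)) (c, t)).2 = t + cntP xs (-c) := by
  induction xs generalizing c t with
  | nil => simp [cntP]
  | cons dp rest ih =>
    simp only [List.foldl_cons]
    by_cases h : (dp.1 == "R") = true
    · simp only [if_pos h]
      rw [ih]
      simp only [cntP, h, if_true,
        PySem.Int.mod_eq_emod_of_pos (show (0:Int) < 100 by norm_num)]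
      rw [cntP_congr rest (-((c + dp.2) % 100)) (-c - dp.2) (by omega)]
      by_cases h0 : (c + dp.2) % 100 = 0
      · rw [if_pos (show ((c + dp.2) % 100 == 0) = true from by simpa using h0),
          if_pos (show (dp.2 - -c) % 100 = 0 from by omega)]
        ring
      · rw [if_neg (show ¬(((c + dp.2) % 100 == 0) = true) from by simpa using h0),
          if_neg (show ¬((dp.2 - -c) % 100 = 0) from by omega)]
        ring
    · simp only [if_neg h]
      rw [ih]
      simp only [cntP, h, Bool.false_eq_true, if_false,
        PySem.Int.mod_eq_emod_of_pos (show (0:Int) < 100 by norm_num)]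
      rw [cntP_congr rest (-((c - dp.2) % 100)) (-c - -dp.2) (by omega)]
      by_cases h0 : (c - dp.2) % 100 = 0
      · rw [if_pos (show ((c - dp.2) % 100 == 0) = true from by simpa using h0),
          if_pos (show (-dp.2 - -c) % 100 = 0 from by omega)]
        ring
      · rw [if_neg (show ¬(((c - dp.2) % 100 == 0) = true) from by simpa using h0),
          if_neg (show ¬((-dp.2 - -c) % 100 = 0) from by omega)]
        ring

-- ===== VERDICT (by name: the statement is the Claim_ definition above) =====
theorem part1_spec : Claim_equal_part1 := by
  intro data _
  show part1 data = part1_alt data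
  unfold part1 part1_alt
  rw [A_inv data 50 0, solve_eq]
  simp only [zero_add]
  exact cntP_congr data (-50) 50 (by decide)
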